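-- pv_equiv track=rewrite | github.com/mangafan92/ProblemSolvingPython | 050-099/058.py | cornerValue
-- ===== SOURCE A (Python) =====
-- cornerValues = dict()
--
-- def cornerValue(corner: int) -> int:
--     try:
--         return cornerValues[corner]
--     except:
--         if corner == 0:
--             cornerValues[corner] = 1
--         else:
--             cornerValues[corner] = 2 * ((corner - 1) // 4 + 1) + cornerValue(corner - 1)
--         return cornerValues[corner]
-- ===== SOURCE B (Python) =====
-- def cornerValue(corner: int) -> int:
--     # closed form: 1 + 2*corner + 2*sum_{j=0}^{corner-1} j//4
--     q, r = divmod(corner, 4)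
--     return 1 + 2 * corner + 2 * (2 * q * (q - 1) + r * q)
-- ===== Notes on version B (the rewrite author's own statement) =====
-- stated objective: faster
-- what changed: Replaced the O(n) memoized recursion with an O(1) closed-form formula obtained by summing the per-step increments 2*((k-1)//4+1).
-- outside the precondition, e.g. on cornerValue(-1): A raises RecursionError, B returns 1
import Mathlib
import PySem

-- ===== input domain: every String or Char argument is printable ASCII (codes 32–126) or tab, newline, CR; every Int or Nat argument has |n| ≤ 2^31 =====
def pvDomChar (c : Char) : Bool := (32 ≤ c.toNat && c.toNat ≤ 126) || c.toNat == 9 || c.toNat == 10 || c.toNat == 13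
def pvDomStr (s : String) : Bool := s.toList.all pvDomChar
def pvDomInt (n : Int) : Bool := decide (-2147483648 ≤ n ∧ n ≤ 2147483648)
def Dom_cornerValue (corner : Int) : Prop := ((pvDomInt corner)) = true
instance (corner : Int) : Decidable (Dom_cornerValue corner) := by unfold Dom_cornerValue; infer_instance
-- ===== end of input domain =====

-- B replaces A's O(n) memoized recursion by an O(1) closed-form sum of the per-step increments.

-- ===== PORT A =====
-- A's memoized recursion: cv(0) = 1, cv(n) = 2*((n-1)//4 + 1) + cv(n-1).
-- Memoization does not affect the return value of a single call; the 'else' guard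
-- below only totalizes the recursion (A never returns on corner < 0: RecursionError,
-- excluded by Pre_).
def cornerValue (corner : Int) : Int :=
  if corner = 0 then 1
  else if _h : 0 < corner then
    2 * (PySem.Int.floordiv (corner - 1) 4 + 1) + cornerValue (corner - 1)
  else 0
termination_by corner.toNat
decreasing_by omega

-- ===== PORT B =====
def cornerValue_alt (corner : Int) : Int :=
  let q := PySem.Int.floordiv corner 4
  let r := PySem.Int.mod corner 4
  1 + 2 * corner + 2 * (2 * q * (q - 1) + r * q)

-- ===== PRECONDITION & SPEC =====
-- A recurses on corner-1 with no negative base case: on corner < 0 it raises RecursionError.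
def Pre_cornerValue (corner : Int) : Prop := 0 ≤ corner
instance (corner : Int) : Decidable (Pre_cornerValue corner) := by unfold Pre_cornerValue; infer_instance
def pvWitness_cornerValue : Int := (7)

def Spec_cornerValue (corner : Int) (out : Int) : Prop := out = cornerValue_alt corner
instance (corner : Int) (out : Int) : Decidable (Spec_cornerValue corner out) := by unfold Spec_cornerValue; infer_instance

-- ===== CLAIM (what is proved, stated in full; the proofs are below) =====
def Claim_equal_cornerValue : Prop := ∀ (corner : Int), Dom_cornerValue corner → Pre_cornerValue corner → Spec_cornerValue corner (cornerValue corner)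

-- ===== LEMMAS AND PROOFS =====

theorem cornerValue_alt_closed (corner : Int) (h : 0 ≤ corner) :
    cornerValue_alt corner =
      1 + 2 * corner + 2 * (2 * (corner / 4) * (corner / 4 - 1) + (corner % 4) * (corner / 4)) := by
  unfold cornerValue_alt
  rw [PySem.Int.floordiv_eq_ediv_of_pos (by omega), PySem.Int.mod_eq_emod_of_pos (by omega)]

theorem cornerValue_alt_step (m : Int) (hm : 0 ≤ m) :
    cornerValue_alt (m + 1) = 2 * (m / 4 + 1) + cornerValue_alt m := by
  rw [cornerValue_alt_closed _ (by omega), cornerValue_alt_closed _ hm]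
  obtain ⟨q, r, hqr, hr0, hr3⟩ : ∃ q r, m = 4 * q + r ∧ 0 ≤ r ∧ r < 4 :=
    ⟨m / 4, m % 4, by omega, by omega, by omega⟩
  subst hqr
  interval_cases r
  · rw [show (4 * q + 0 + 1) / 4 = q from by omega, show (4 * q + 0 + 1) % 4 = 1 from by omega,
      show (4 * q + 0) / 4 = q from by omega, show (4 * q + 0) % 4 = 0 from by omega]; ring
  · rw [show (4 * q + 1 + 1) / 4 = q from by omega, show (4 * q + 1 + 1) % 4 = 2 from by omega,
      show (4 * q + 1) / 4 = q from by omega, show (4 * q + 1) % 4 = 1 from by omega]; ring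
  · rw [show (4 * q + 2 + 1) / 4 = q from by omega, show (4 * q + 2 + 1) % 4 = 3 from by omega,
      show (4 * q + 2) / 4 = q from by omega, show (4 * q + 2) % 4 = 2 from by omega]; ring
  · rw [show (4 * q + 3 + 1) / 4 = q + 1 from by omega, show (4 * q + 3 + 1) % 4 = 0 from by omega,
      show (4 * q + 3) / 4 = q from by omega, show (4 * q + 3) % 4 = 3 from by omega]; ring

theorem cornerValue_eq_alt (n : Nat) : cornerValue (n : Int) = cornerValue_alt (n : Int) := by
  induction n with
  | zero =>
    rw [Nat.cast_zero, cornerValue]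
    norm_num [cornerValue_alt, PySem.Int.floordiv, PySem.Int.mod]
  | succ m ih =>
    rw [cornerValue]
    have hne : ((m + 1 : Nat) : Int) ≠ 0 := by omega
    have hpos : (0 : Int) < ((m + 1 : Nat) : Int) := by omega
    rw [if_neg hne, dif_pos hpos]
    have h1 : ((m + 1 : Nat) : Int) - 1 = (m : Int) := by push_cast; ring
    rw [h1, ih, PySem.Int.floordiv_eq_ediv_of_pos (a := (m : Int)) (by omega),
      show ((m + 1 : Nat) : Int) = (m : Int) + 1 from by push_cast; ring,
      cornerValue_alt_step (m : Int) (by omega)]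

-- ===== VERDICT (by name: the statement is the Claim_ definition above) =====
theorem cornerValue_spec : Claim_equal_cornerValue := by
  intro corner _ hpre
  unfold Spec_cornerValue
  obtain ⟨n, rfl⟩ := Int.eq_ofNat_of_zero_le hpre
  exact cornerValue_eq_alt n
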